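-- pv_equiv track=rewrite | github.com/temirgaliyevaanel/assignment-01-basics-Anel | practice/structures/structures.py | head_tail
-- ===== SOURCE A (Python) =====
-- def head_tail(a, k):
--     """Первые и последние k элементов в массиве"""
--     b = []
--     for i in range(0, k):
--         b.append(a[i])
--     a = a[::-1]
--     for i in range(0, k):
--         b.insert(k, a[i])
--     return b
--     pass
-- ===== SOURCE B (Python) =====
-- def head_tail(a, k):
--     """Первые и последние k элементов в массиве"""
--     if k <= 0:
--         return []
--     return a[:k] + a[len(a) - k:]
-- ===== Notes on version B (the rewrite author's own statement) =====
-- stated objective: faster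
-- what changed: B replaces A's two loops (element-by-element appends, a reversed copy, and a quadratic insert(k, ...) loop) by a k<=0 guard plus two direct slices a[:k] + a[len(a)-k:].
import Mathlib
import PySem

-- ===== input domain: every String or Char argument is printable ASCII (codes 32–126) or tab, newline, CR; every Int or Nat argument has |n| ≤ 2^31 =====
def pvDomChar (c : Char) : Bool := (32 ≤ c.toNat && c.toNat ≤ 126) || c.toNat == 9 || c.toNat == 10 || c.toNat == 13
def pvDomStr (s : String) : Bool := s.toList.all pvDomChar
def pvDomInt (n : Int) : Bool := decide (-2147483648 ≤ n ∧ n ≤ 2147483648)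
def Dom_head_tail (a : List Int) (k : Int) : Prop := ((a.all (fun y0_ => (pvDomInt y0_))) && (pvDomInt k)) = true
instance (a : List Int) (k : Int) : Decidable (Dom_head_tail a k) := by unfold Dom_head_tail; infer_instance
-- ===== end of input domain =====

-- B replaces A's two loops (appends, a reversed copy, a quadratic insert(k, ...) loop)
-- by a k<=0 guard plus two direct slices a[:k] + a[len(a)-k:] (objective: faster).

-- ===== PORT A =====
def head_tail (a : List Int) (k : Int) : List Int :=
  let b := (PySem.List.pyRange 0 k 1).foldl (fun b i => b ++ [PySem.List.pyGetD a i 0]) []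
  let a2 := (PySem.List.slice? a none none (-1)).getD []   -- a = a[::-1]
  (PySem.List.pyRange 0 k 1).foldl (fun b i => PySem.List.insert b k (PySem.List.pyGetD a2 i 0)) b

-- ===== PORT B =====
def head_tail_alt (a : List Int) (k : Int) : List Int :=
  if k ≤ 0 then []
  else PySem.List.slice a none (some k) ++ PySem.List.slice a (some ((a.length : Int) - k)) none

-- ===== PRECONDITION & SPEC =====
-- A raises IndexError (a[i] in the first loop) exactly when k > len(a); Pre_ excludes those inputs.
def Pre_head_tail (a : List Int) (k : Int) : Prop := k ≤ (a.length : Int)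
instance (a : List Int) (k : Int) : Decidable (Pre_head_tail a k) := by unfold Pre_head_tail; infer_instance
def pvWitness_head_tail : List Int × Int := ([1, 2, 3, 4, 5], 2)
def Spec_head_tail (a : List Int) (k : Int) (out : List Int) : Prop := out = head_tail_alt a k
instance (a : List Int) (k : Int) (out : List Int) : Decidable (Spec_head_tail a k out) := by unfold Spec_head_tail; infer_instance

-- ===== CLAIM (what is proved, stated in full; the proofs are below) =====
def Claim_equal_head_tail : Prop := ∀ (a : List Int) (k : Int), Dom_head_tail a k → Pre_head_tail a k → Spec_head_tail a k (head_tail a k)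

-- ===== LEMMAS AND PROOFS =====

-- A's insert(k, x) loop on a list b0 ++ t with |b0| = k appends xs reversed after b0.
theorem foldl_insert_at (kn : Nat) (xs : List Int) (b0 t : List Int) (hb : b0.length = kn) :
    xs.foldl (fun b x => PySem.List.insert b (kn : Int) x) (b0 ++ t) = b0 ++ xs.reverse ++ t := by
  induction xs generalizing t with
  | nil => simp
  | cons x xs ih =>
    have hins : PySem.List.insert (b0 ++ t) (kn : Int) x = b0 ++ x :: t := by
      rw [PySem.List.insert_natCast _ _ _ (by simp [hb])]
      rw [← hb, List.take_left, List.drop_left]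
    simp only [List.foldl_cons, hins, ih (x :: t)]
    simp

-- 'for i in range(0, m): pyGetD a i' collects a.take m
theorem map_pyGetD_take (a : List Int) (m : Nat) (h : m ≤ a.length) :
    (PySem.List.pyRange 0 (m : Int) 1).map (fun i => PySem.List.pyGetD a i 0) = a.take m := by
  have hsplit := PySem.List.pyRange_one_append 0 (m : Int) (a.length : Int)
    (by exact_mod_cast Nat.zero_le m) (by exact_mod_cast h)
  have hfull : ((PySem.List.pyRange 0 (a.length : Int) 1).map (fun i => PySem.List.pyGetD a i 0)) = a :=
    PySem.List.map_pyGetD_pyRange_zero' a 0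
  rw [hsplit, List.map_append] at hfull
  have hlen : ((PySem.List.pyRange 0 (m : Int) 1).map (fun i => PySem.List.pyGetD a i 0)).length = m := by
    simp [PySem.List.length_pyRange_one]
  conv_rhs => rw [← hfull]
  rw [List.take_left' hlen]

-- ===== VERDICT (by name: the statement is the Claim_ definition above) =====
theorem head_tail_spec : Claim_equal_head_tail := by
  intro a k _ hpre
  unfold Pre_head_tail at hpre
  unfold Spec_head_tail head_tail head_tail_alt
  simp only []
  by_cases hk : k ≤ 0
  · rw [PySem.List.pyRange_one_eq_nil hk, if_pos hk]
    simp
  · rw [if_neg hk]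
    rw [not_le] at hk
    obtain ⟨kn, rfl⟩ : ∃ kn : Nat, k = (kn : Int) := ⟨k.toNat, (Int.toNat_of_nonneg (le_of_lt hk)).symm⟩
    have hkl : kn ≤ a.length := by exact_mod_cast hpre
    -- A's first loop builds a.take kn
    have hpref : (PySem.List.pyRange 0 (kn : Int) 1).foldl
        (fun b i => b ++ [PySem.List.pyGetD a i 0]) ([] : List Int) = a.take kn := by
      rw [PySem.List.foldl_append_singleton_eq_map, map_pyGetD_take a kn hkl]; simp
    rw [hpref]
    -- A's second loop: reversed copy, then the insert loop
    rw [PySem.List.slice?_none_none_neg_one]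
    simp only [Option.getD_some]
    have hAloop : (PySem.List.pyRange 0 (kn : Int) 1).foldl
        (fun b i => PySem.List.insert b (kn : Int) (PySem.List.pyGetD a.reverse i 0)) (a.take kn)
        = a.take kn ++ ((a.reverse.take kn).reverse) := by
      have hmap : (PySem.List.pyRange 0 (kn : Int) 1).map
          (fun i => PySem.List.pyGetD a.reverse i 0) = a.reverse.take kn :=
        map_pyGetD_take a.reverse kn (by simpa using hkl)
      calc (PySem.List.pyRange 0 (kn : Int) 1).foldl
            (fun b i => PySem.List.insert b (kn : Int) (PySem.List.pyGetD a.reverse i 0)) (a.take kn)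
          = ((PySem.List.pyRange 0 (kn : Int) 1).map
              (fun i => PySem.List.pyGetD a.reverse i 0)).foldl
              (fun b x => PySem.List.insert b (kn : Int) x) (a.take kn) := by
            rw [List.foldl_map]
        _ = (a.reverse.take kn).foldl (fun b x => PySem.List.insert b (kn : Int) x)
              (a.take kn ++ []) := by rw [hmap]; simp
        _ = a.take kn ++ (a.reverse.take kn).reverse ++ [] :=
              foldl_insert_at kn _ _ [] (by simp [hkl])
        _ = a.take kn ++ (a.reverse.take kn).reverse := by simp
    rw [hAloop]
    -- B's two slices
    have hn : (0 : Int) ≤ (a.length : Int) - (kn : Int) := by omega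
    rw [PySem.List.slice_to_natCast, PySem.List.slice_from a hn]
    have ht : ((a.length : Int) - (kn : Int)).toNat = a.length - kn := by omega
    rw [List.take_reverse, List.reverse_reverse, ht]
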